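-- pv_equiv track=rewrite | github.com/Sanssssssssssssssss/erp-approval-agent | backend/benchmarks/case_loader.py | _sample_cases
-- ===== SOURCE A (Python) =====
-- from typing import Any
--
-- def _sample_cases(cases: list[dict[str, Any]], sample_per_type: int | None) -> list[dict[str, Any]]:
--     if sample_per_type is None or sample_per_type <= 0:
--         return cases
--
--     buckets: dict[str, list[dict[str, Any]]] = {}
--     for case in cases:
--         question_type = str(case.get("question_type", "untyped") or "untyped").strip().lower()
--         buckets.setdefault(question_type, []).append(case)
--
--     sampled: list[dict[str, Any]] = []
--     for question_type in sorted(buckets):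
--         subtype_buckets: dict[str, list[dict[str, Any]]] = {}
--         for case in buckets[question_type]:
--             subtype = str(case.get("subtype", "") or "unknown").strip().lower() or "unknown"
--             subtype_buckets.setdefault(subtype, []).append(case)
--
--         selected_for_type: list[dict[str, Any]] = []
--         subtype_order = [key for key in sorted(subtype_buckets)]
--         while len(selected_for_type) < sample_per_type and subtype_order:
--             next_round: list[str] = []
--             for subtype in subtype_order:
--                 items = subtype_buckets.get(subtype, [])
--                 if items and len(selected_for_type) < sample_per_type:
--                     selected_for_type.append(items.pop(0))
--                 if items:
--                     next_round.append(subtype)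
--             subtype_order = next_round
--         sampled.extend(selected_for_type)
--     return sampled
-- ===== SOURCE B (Python) =====
-- def _sample_cases(cases, sample_per_type):
--     if sample_per_type is None or sample_per_type <= 0:
--         return cases
--
--     buckets = {}
--     for case in cases:
--         question_type = str(case.get("question_type", "untyped") or "untyped").strip().lower()
--         buckets.setdefault(question_type, []).append(case)
--
--     sampled = []
--     for question_type in sorted(buckets):
--         subtype_buckets = {}
--         for case in buckets[question_type]:
--             subtype = str(case.get("subtype", "") or "unknown").strip().lower() or "unknown"
--             subtype_buckets.setdefault(subtype, []).append(case)
--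
--         # transpose the sorted subtype rows column by column (round-robin order)
--         # and keep the first sample_per_type items: no active-list bookkeeping, no pops
--         rows = [subtype_buckets[key] for key in sorted(subtype_buckets)]
--         width = max(map(len, rows), default=0)
--         flat = [row[i] for i in range(width) for row in rows if i < len(row)]
--         sampled.extend(flat[:sample_per_type])
--     return sampled
-- ===== Notes on version B (the rewrite author's own statement) =====
-- stated objective: simpler
-- what changed: The per-type while-loop that maintains a shrinking active subtype list and pops the head of each bucket is replaced by a direct column-by-column transpose of the sorted subtype buckets (one indexed comprehension) truncated to sample_per_type, with no mutable bookkeeping.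
import Mathlib
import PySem

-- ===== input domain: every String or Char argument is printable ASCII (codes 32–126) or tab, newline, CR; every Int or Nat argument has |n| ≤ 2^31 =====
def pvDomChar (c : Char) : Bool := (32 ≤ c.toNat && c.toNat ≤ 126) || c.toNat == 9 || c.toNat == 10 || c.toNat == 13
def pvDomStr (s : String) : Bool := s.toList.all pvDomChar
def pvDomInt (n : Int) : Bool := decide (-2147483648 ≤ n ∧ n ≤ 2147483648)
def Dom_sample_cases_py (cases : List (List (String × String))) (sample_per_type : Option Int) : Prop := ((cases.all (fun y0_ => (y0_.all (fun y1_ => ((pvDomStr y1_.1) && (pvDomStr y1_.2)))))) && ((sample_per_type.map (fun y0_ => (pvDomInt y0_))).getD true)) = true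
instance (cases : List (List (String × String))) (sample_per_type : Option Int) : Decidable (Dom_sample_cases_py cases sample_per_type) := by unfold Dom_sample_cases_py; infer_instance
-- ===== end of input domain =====

-- B replaces A's shrinking-active-list round-robin loop (with pop(0)) by a column-by-column
-- transpose of the sorted subtype rows, truncated to sample_per_type: simpler, same values.

-- ===== PORT A =====
-- shared key extraction and bucketing (identical lines in both Pythons)
def pvQType (case : List (String × String)) : String :=
  let v := (PySem.Dict.mk case).getD "question_type" "untyped"
  let v := if v = "" then "untyped" else v
  PySem.Str.lower (PySem.Str.strip v)

def pvSubtype (case : List (String × String)) : String :=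
  let v := (PySem.Dict.mk case).getD "subtype" ""
  let v := if v = "" then "unknown" else v
  let v := PySem.Str.lower (PySem.Str.strip v)
  if v = "" then "unknown" else v

def pvBucketBy (key : List (String × String) → String) (cs : List (List (String × String))) :
    PySem.Dict String (List (List (String × String))) :=
  cs.foldl (fun d c => d.insert (key c) (d.getD (key c) [] ++ [c])) PySem.Dict.empty

-- one pass of A's inner `for subtype in subtype_order` body, state (dict, selected, next_round)
def pvRRStep (k : Int)
    (st : PySem.Dict String (List (List (String × String))) × List (List (String × String)) × List String)
    (s : String) :
    PySem.Dict String (List (List (String × String))) × List (List (String × String)) × List String :=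
  match st with
  | (d, sel, nr) =>
    match d.getD s [] with
    | [] => (d, sel, nr)
    | x :: rest =>
      if (sel.length : Int) < k then
        (d.insert s rest, sel ++ [x], if rest = [] then nr else nr ++ [s])
      else (d, sel, nr ++ [s])

-- A's `while` loop, with enough fuel (the loop runs at most (number of cases)+1 times)
def pvRRLoop (k : Int) :
    Nat → PySem.Dict String (List (List (String × String))) → List String →
    List (List (String × String)) → List (List (String × String))
  | 0, _, _, sel => sel
  | fuel+1, d, order, sel =>
    if (sel.length : Int) < k ∧ order ≠ [] then
      match order.foldl (pvRRStep k) (d, sel, []) with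
      | (d', sel', nr) => pvRRLoop k fuel d' nr sel'
    else sel

def sample_cases_py (cases : List (List (String × String))) (sample_per_type : Option Int) :
    List (List (String × String)) :=
  match sample_per_type with
  | none => cases
  | some k =>
    if k ≤ 0 then cases
    else
      let buckets := pvBucketBy pvQType cases
      (PySem.List.sorted buckets.keys (fun s => s.toList)).foldl
        (fun sampled qt =>
          let group := buckets.getD qt []
          let sb := pvBucketBy pvSubtype group
          let order := PySem.List.sorted sb.keys (fun s => s.toList)
          sampled ++ pvRRLoop k (group.length + 2) sb order []) []

-- ===== PORT B =====
def sample_cases_py_alt (cases : List (List (String × String))) (sample_per_type : Option Int) :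
    List (List (String × String)) :=
  match sample_per_type with
  | none => cases
  | some k =>
    if k ≤ 0 then cases
    else
      let buckets := pvBucketBy pvQType cases
      (PySem.List.sorted buckets.keys (fun s => s.toList)).foldl
        (fun sampled qt =>
          let sb := pvBucketBy pvSubtype (buckets.getD qt [])
          let rows := (PySem.List.sorted sb.keys (fun s => s.toList)).map (fun s => sb.getD s [])
          -- width = max(map(len, rows), default=0)
          let width := PySem.List.maxD (rows.map PySem.List.len) (fun x => x) 0
          -- flat = [row[i] for i in range(width) for row in rows if i < len(row)]
          let flat := (PySem.List.pyRange 0 width 1).flatMap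
            (fun i => rows.filterMap
              (fun row => if i < (row.length : Int) then PySem.List.pyGet? row i else none))
          -- flat[:sample_per_type]
          sampled ++ PySem.List.slice flat none (some k)) []

-- ===== PRECONDITION & SPEC =====
def Spec_sample_cases_py (cases : List (List (String × String))) (sample_per_type : Option Int) (out : List (List (String × String))) : Prop := out = sample_cases_py_alt cases sample_per_type
instance (cases : List (List (String × String))) (sample_per_type : Option Int) (out : List (List (String × String))) : Decidable (Spec_sample_cases_py cases sample_per_type out) := by unfold Spec_sample_cases_py; infer_instance

-- ===== CLAIM (what is proved, stated in full; the proofs are below) =====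
def Claim_equal_sample_cases_py : Prop := ∀ (cases : List (List (String × String))) (sample_per_type : Option Int), Dom_sample_cases_py cases sample_per_type → Spec_sample_cases_py cases sample_per_type (sample_cases_py cases sample_per_type)

-- ===== LEMMAS AND PROOFS =====

-- column-major flatten of the first w columns (what B's comprehension computes)
def pvCols (w : Nat) (rows : List (List (List (String × String)))) : List (List (String × String)) :=
  (List.range w).flatMap (fun i => rows.filterMap (fun r => r[i]?))

-- total number of cases still in the buckets named by `order`
def pvTotal (d : PySem.Dict String (List (List (String × String)))) (order : List String) : Nat :=
  (order.map (fun s => (d.getD s []).length)).sum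

-- pop the head of every bucket named in `ss`
def pvTailAll (d : PySem.Dict String (List (List (String × String)))) (ss : List String) :
    PySem.Dict String (List (List (String × String))) :=
  ss.foldl (fun d s => d.insert s ((d.getD s []).tail)) d

lemma pvCols_nil (w : Nat) : pvCols w [] = [] := by
  simp [pvCols]

lemma pvCol_succ (rows : List (List (List (String × String)))) (i : Nat) :
    rows.filterMap (fun r => r[i+1]?) =
      ((rows.filter (fun r => !decide (r = []))).map List.tail).filterMap (fun r => r[i]?) := by
  induction rows with
  | nil => rfl
  | cons r rs ih =>
    cases r with
    | nil => simpa using ih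
    | cons x xs => cases hx : xs[i]? <;> simp [hx, ih]

lemma pvCol_filter (rows : List (List (List (String × String)))) (i : Nat) :
    (rows.filter (fun r => !decide (r = []))).filterMap (fun r => r[i]?) =
      rows.filterMap (fun r => r[i]?) := by
  induction rows with
  | nil => rfl
  | cons r rs ih =>
    cases r with
    | nil => simpa using ih
    | cons x xs => cases hx : (x::xs)[i]? <;> simp [hx, ih]

lemma pvCols_succ (w : Nat) (rows : List (List (List (String × String)))) :
    pvCols (w+1) rows =
      rows.filterMap (fun r => r[0]?) ++
        pvCols w ((rows.filter (fun r => !decide (r = []))).map List.tail) := by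
  simp only [pvCols, List.range_succ_eq_map, List.flatMap_cons, List.flatMap_map]
  congr 1
  have : (fun i => List.filterMap (fun r => r[Nat.succ i]?) rows) =
      (fun i => ((rows.filter (fun r => !decide (r = []))).map List.tail).filterMap
        (fun r => r[i]?)) := funext (fun i => pvCol_succ rows i)
  rw [this]

lemma pvCols_filter (w : Nat) (rows : List (List (List (String × String)))) :
    pvCols w (rows.filter (fun r => !decide (r = []))) = pvCols w rows := by
  simp only [pvCols]
  congr 1
  funext i
  exact pvCol_filter rows i

lemma pvCol_zero_of_ne_nil (rows : List (List (List (String × String))))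
    (h : ∀ r ∈ rows, r ≠ []) :
    rows.filterMap (fun r => r[0]?) = rows.map (fun r => r.headD []) := by
  induction rows with
  | nil => rfl
  | cons r rs ih =>
    have hr := h r (by simp)
    cases r with
    | nil => exact absurd rfl hr
    | cons x xs => simpa using ih (fun r hmem => h r (by simp [hmem]))

lemma pvTailAll_getD_not_mem (d : PySem.Dict String (List (List (String × String))))
    (ss : List String) (s : String) (v : List (List (String × String)))
    (h : s ∉ ss) : (pvTailAll d ss).getD s v = d.getD s v := by
  induction ss generalizing d with
  | nil => rfl
  | cons a as ih =>
    have hs : s ≠ a := by intro he; exact h (by simp [he])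
    have h2 : s ∉ as := fun hm => h (by simp [hm])
    simp only [pvTailAll, List.foldl_cons] at *
    rw [ih _ h2, PySem.Dict.getD_insert]
    simp [hs]

lemma pvTailAll_getD_mem (d : PySem.Dict String (List (List (String × String))))
    (ss : List String) (s : String)
    (hnd : ss.Nodup) (h : s ∈ ss) :
    (pvTailAll d ss).getD s [] = (d.getD s []).tail := by
  induction ss generalizing d with
  | nil => simp at h
  | cons a as ih =>
    simp only [List.nodup_cons] at hnd
    simp only [pvTailAll, List.foldl_cons] at *
    rcases List.mem_cons.mp h with he | hm
    · subst he
      have hfold : (List.foldl (fun d s => d.insert s (d.getD s []).tail)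
          (d.insert s (d.getD s []).tail) as) = pvTailAll (d.insert s ((d.getD s []).tail)) as := rfl
      rw [hfold, pvTailAll_getD_not_mem _ _ _ _ hnd.1, PySem.Dict.getD_insert]
      simp
    · have hs : s ≠ a := by rintro rfl; exact hnd.1 hm
      rw [ih _ hnd.2 hm, PySem.Dict.getD_insert]
      simp [hs]

-- sums of Nat lists: drop the zero entries, subtract one everywhere
lemma pvSum_filter_zero (l : List String) (f : String → Nat) (p : String → Bool)
    (h : ∀ s ∈ l, p s = false → f s = 0) :
    ((l.filter p).map f).sum = (l.map f).sum := by
  induction l with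
  | nil => rfl
  | cons a as ih =>
    have ih' := ih (fun s hs hp => h s (by simp [hs]) hp)
    cases hp : p a with
    | true => simp [hp, ih']
    | false => simp [hp, ih', h a (by simp) hp]

lemma pvSum_sub_one (l : List Nat) (h : ∀ x ∈ l, 1 ≤ x) :
    (l.map (fun x => x - 1)).sum + l.length = l.sum := by
  induction l with
  | nil => rfl
  | cons a as ih =>
    have := h a (by simp)
    have ih' := ih (fun x hx => h x (by simp [hx]))
    simp only [List.map_cons, List.sum_cons, List.length_cons]
    omega

-- one round of A's inner for-loop, characterised: it pops the head of the first
-- min(quota, len(order)) buckets, appends those heads to `selected`, and queues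
-- the still-nonempty processed buckets (then all unprocessed ones) for the next round
lemma pvRound (k : Int) (order : List String) :
    ∀ (d : PySem.Dict String (List (List (String × String))))
      (sel : List (List (String × String))) (nr : List String),
    order.Nodup → (∀ s ∈ order, d.getD s [] ≠ []) →
    order.foldl (pvRRStep k) (d, sel, nr) =
      (pvTailAll d (order.take (min (k - sel.length).toNat order.length)),
       sel ++ (order.take (min (k - sel.length).toNat order.length)).map
         (fun s => (d.getD s []).headD []),
       nr ++ (order.take (min (k - sel.length).toNat order.length)).filter
           (fun s => !decide ((d.getD s []).tail = [])) ++
         order.drop (min (k - sel.length).toNat order.length)) := by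
  induction order with
  | nil => intro d sel nr _ _; simp [pvTailAll]
  | cons s rest ih =>
    intro d sel nr hnd hne
    simp only [List.nodup_cons] at hnd
    obtain ⟨x, xs, hx⟩ : ∃ x xs, d.getD s [] = x :: xs := by
      rcases hcase : d.getD s [] with _ | ⟨x, xs⟩
      · exact absurd hcase (hne s (by simp))
      · exact ⟨x, xs, rfl⟩
    simp only [List.foldl_cons]
    by_cases hlt : (sel.length : Int) < k
    · -- a pop happens at s
      have hstep : pvRRStep k (d, sel, nr) s =
          (d.insert s xs, sel ++ [x], if xs = [] then nr else nr ++ [s]) := by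
        simp [pvRRStep, hx, hlt]
      rw [hstep]
      have hne2 : ∀ r ∈ rest, (d.insert s xs).getD r [] ≠ [] := by
        intro r hr
        rw [PySem.Dict.getD_insert]
        have : r ≠ s := by rintro rfl; exact hnd.1 hr
        simp only [this, if_false]
        exact hne r (by simp [hr])
      rw [ih (d.insert s xs) (sel ++ [x]) _ hnd.2 hne2]
      have hq : min (k - (sel.length : Int)).toNat (rest.length + 1) =
          min (k - ((sel.length : Nat) + 1) : Int).toNat rest.length + 1 := by omega
      have hgetD : ∀ r ∈ rest, (d.insert s xs).getD r [] = d.getD r [] := by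
        intro r hr
        rw [PySem.Dict.getD_insert]
        have : r ≠ s := by rintro rfl; exact hnd.1 hr
        simp [this]
      have hlen : ((sel ++ [x]).length : Int) = (sel.length : Int) + 1 := by
        simp
      have hunf : ∀ t, pvTailAll d (s :: t) =
          pvTailAll (d.insert s ((d.getD s []).tail)) t := fun t => rfl
      refine Prod.ext ?_ (Prod.ext ?_ ?_)
      · -- dict component
        simp only [hlen, List.length_cons, hq, List.take_succ_cons, hunf, hx, List.tail_cons]
      · -- selected component
        simp only [hlen, List.length_cons, hq, List.take_succ_cons, List.map_cons, hx]
        rw [List.map_congr_left (fun r hr => by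
          rw [hgetD r (List.mem_of_mem_take hr)])]
        simp
      · -- next-round component
        simp only [hlen, List.length_cons, hq, List.take_succ_cons,
          List.drop_succ_cons, List.filter_cons, hx]
        rw [List.filter_congr (fun r hr => by
          rw [hgetD r (List.mem_of_mem_take hr)])]
        rcases xs with _ | ⟨y, ys⟩ <;> simp
    · -- quota already reached: only next_round is extended
      have hstep : pvRRStep k (d, sel, nr) s = (d, sel, nr ++ [s]) := by
        simp [pvRRStep, hx, hlt]
      rw [hstep, ih d sel (nr ++ [s]) hnd.2 (fun r hr => hne r (by simp [hr]))]
      have hq0 : (k - (sel.length : Int)).toNat = 0 := by omega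
      simp [hq0, pvTailAll]

lemma pvTotal_ge (d : PySem.Dict String (List (List (String × String))))
    (order : List String) (hne : ∀ s ∈ order, d.getD s [] ≠ []) :
    order.length ≤ pvTotal d order := by
  have h := pvSum_sub_one (order.map (fun s => (d.getD s []).length)) (by
    intro x hx
    obtain ⟨s, hs, rfl⟩ := List.mem_map.mp hx
    have := hne s hs
    cases hcase : d.getD s [] with
    | nil => exact absurd hcase this
    | cons a l => simp)
  unfold pvTotal
  simp only [List.length_map] at h
  omega

lemma pvFilterMap (f : String → List (List (String × String))) (l : List String) :
    (l.filter (fun s => !decide (f s = []))).map f =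
      (l.map f).filter (fun r => !decide (r = [])) := by
  induction l with
  | nil => rfl
  | cons a as ih => by_cases h : f a = [] <;> simp [h, ih]

lemma pvMain (k : Int) :
    ∀ (fuel : Nat) (d : PySem.Dict String (List (List (String × String))))
      (order : List String) (sel : List (List (String × String))) (w : Nat),
    order.Nodup → (∀ s ∈ order, d.getD s [] ≠ []) →
    (∀ s ∈ order, (d.getD s []).length ≤ w) →
    pvTotal d order + 1 ≤ fuel →
    pvRRLoop k fuel d order sel =
      sel ++ (pvCols w (order.map (fun s => d.getD s []))).take ((k - sel.length).toNat) := by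
  intro fuel
  induction fuel with
  | zero => intro d order sel w _ _ _ hfuel; omega
  | succ n ih =>
    intro d order sel w hnd hne hw hfuel
    by_cases hcond : (sel.length : Int) < k ∧ order ≠ []
    · obtain ⟨h1, h2⟩ := hcond
      simp only [pvRRLoop]
      rw [if_pos ⟨h1, h2⟩, pvRound k order d sel [] hnd hne]
      simp only [List.nil_append]
      -- abbreviations
      set t := (k - (sel.length : Int)).toNat with hts
      have ht1 : 1 ≤ t := by omega
      have hord1 : 1 ≤ order.length := List.length_pos_iff.mpr h2
      have hw1 : 1 ≤ w := by
        obtain ⟨s0, hs0⟩ := List.exists_mem_of_ne_nil order h2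
        have := hne s0 hs0
        have hl := hw s0 hs0
        have : 1 ≤ (d.getD s0 []).length := List.length_pos_iff.mpr this
        omega
      have hrows_ne : ∀ r ∈ order.map (fun s => d.getD s []), r ≠ [] := by
        intro r hr
        obtain ⟨s, hs, rfl⟩ := List.mem_map.mp hr
        exact hne s hs
      have hcols : pvCols w (order.map fun s => d.getD s []) =
          (order.map fun s => (d.getD s []).headD []) ++
            pvCols (w - 1) ((order.map fun s => d.getD s []).map List.tail) := by
        have hsplit := pvCols_succ (w - 1) (order.map fun s => d.getD s [])
        rw [show w - 1 + 1 = w by omega] at hsplit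
        rw [hsplit, List.filter_eq_self.mpr (by
          intro r hr; simpa using hrows_ne r hr)]
        rw [pvCol_zero_of_ne_nil _ hrows_ne, List.map_map]
        rfl
      by_cases hfull : order.length ≤ t
      · -- a full round: every bucket is popped once
        have hp : min t order.length = order.length := by omega
        rw [hp, List.take_length, List.drop_length]
        simp only [List.append_nil]
        -- the state after the round
        have hd' : ∀ s ∈ order, (pvTailAll d order).getD s [] = (d.getD s []).tail :=
          fun s hs => pvTailAll_getD_mem d order s hnd hs
        set nr := order.filter (fun s => !decide ((d.getD s []).tail = [])) with hnr
        have hnrsub : ∀ s ∈ nr, s ∈ order := fun s hs => List.mem_of_mem_filter hs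
        have hnrtail : ∀ s ∈ nr, (d.getD s []).tail ≠ [] := by
          intro s hs
          have := List.of_mem_filter hs
          simpa using this
        have hne' : ∀ s ∈ nr, (pvTailAll d order).getD s [] ≠ [] := by
          intro s hs
          rw [hd' s (hnrsub s hs)]
          exact hnrtail s hs
        have hw' : ∀ s ∈ nr, ((pvTailAll d order).getD s []).length ≤ w - 1 := by
          intro s hs
          rw [hd' s (hnrsub s hs)]
          have := hw s (hnrsub s hs)
          have hlt : (d.getD s []).tail.length = (d.getD s []).length - 1 :=
            List.length_tail
          omega
        have hkey : pvTotal (pvTailAll d order) nr + order.length = pvTotal d order := by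
          unfold pvTotal
          rw [List.map_congr_left (fun s hs => by rw [hd' s (hnrsub s hs)])]
          rw [hnr, pvSum_filter_zero order (fun s => (d.getD s []).tail.length) _ (by
            intro s _ hp'
            have h0 : (d.getD s []).tail = [] := by simpa using hp'
            have h1 : (d.getD s []).tail.length = 0 := by rw [h0]; rfl
            exact h1)]
          have hmm : (order.map fun s => (d.getD s []).tail.length) =
              (order.map fun s => (d.getD s []).length).map (fun x => x - 1) := by
            rw [List.map_map]
            exact List.map_congr_left (fun s _ => by
              simp [List.length_tail])
          have hsub := pvSum_sub_one (order.map fun s => (d.getD s []).length) (by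
            intro x hx
            obtain ⟨s, hs, rfl⟩ := List.mem_map.mp hx
            exact List.length_pos_iff.mpr (hne s hs))
          simp only [List.length_map] at hsub
          rw [hmm, hsub]
        have hfuel' : pvTotal (pvTailAll d order) nr + 1 ≤ n := by omega
        rw [ih (pvTailAll d order) nr _ (w - 1) (List.Nodup.filter _ hnd) hne' hw' hfuel']
        -- now rewrite the B side to match
        have hmapnr : nr.map (fun s => (pvTailAll d order).getD s []) =
            ((order.map fun s => d.getD s []).map List.tail).filter
              (fun r => !decide (r = [])) := by
          rw [List.map_congr_left (fun s hs => by rw [hd' s (hnrsub s hs)])]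
          rw [hnr, pvFilterMap (fun s => (d.getD s []).tail) order, List.map_map]
          rfl
        rw [hmapnr, pvCols_filter, hcols, List.take_append]
        have hc0len : (order.map fun s => (d.getD s []).headD []).length = order.length := by
          simp
        rw [List.take_of_length_le (by omega : (order.map fun s => (d.getD s []).headD []).length ≤ t)]
        have hsel'len : (sel ++ order.map fun s => (d.getD s []).headD []).length =
            sel.length + order.length := by simp
        have hq : (k - ((sel ++ order.map fun s => (d.getD s []).headD []).length : Int)).toNat =
            t - (order.map fun s => (d.getD s []).headD []).length := by
          rw [hsel'len, hc0len]
          push_cast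
          omega
        rw [hq, List.append_assoc]
      · -- partial round: the quota fills mid-round and the loop exits
        have hp : min t order.length = t := by omega
        rw [hp]
        have htake : (order.take t).length = t := by
          rw [List.length_take]
          omega
        have hsel'len : (sel ++ (order.take t).map fun s => (d.getD s []).headD []).length =
            sel.length + t := by
          rw [List.length_append, List.length_map, htake]
        have hstop : ¬(((sel ++ (order.take t).map fun s => (d.getD s []).headD []).length : Int) < k) := by
          rw [hsel'len]; push_cast; omega
        have hn1 : 1 ≤ n := by
          have := pvTotal_ge d order hne
          omega
        obtain ⟨m, rfl⟩ : ∃ m, n = m + 1 := ⟨n - 1, by omega⟩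
        simp only [pvRRLoop]
        rw [if_neg (by intro hc; exact hstop hc.1)]
        -- B's side: the first t entries of the head column
        rw [hcols, List.take_append]
        have hc0len : (order.map fun s => (d.getD s []).headD []).length = order.length := by
          simp
        rw [hc0len, show t - order.length = 0 by omega]
        simp only [List.take_zero, List.append_nil]
        rw [← List.map_take]
    · -- the loop stops immediately: quota reached or no subtypes
      simp only [pvRRLoop]
      rw [if_neg hcond]
      by_cases hsl : (sel.length : Int) < k
      · have horder : order = [] := by
          by_contra hne2
          exact hcond ⟨hsl, hne2⟩
        subst horder
        simp [pvCols_nil]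
      · have hq0 : (k - (sel.length : Int)).toNat = 0 := by omega
        simp [hq0]

-- ----- properties of the shared bucketing -----
lemma pvBucketBy_nodup (key : List (String × String) → String)
    (cs : List (List (String × String))) : (pvBucketBy key cs).keys.Nodup :=
  PySem.Dict.nodup_keys_foldl_insert_key cs key _ PySem.Dict.empty (by simp [PySem.Dict.keys_empty])

lemma pvBucketBy_ne (key : List (String × String) → String)
    (cs : List (List (String × String))) :
    ∀ s ∈ (pvBucketBy key cs).keys, (pvBucketBy key cs).getD s [] ≠ [] := by
  suffices h : ∀ (d : PySem.Dict String (List (List (String × String)))),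
      (∀ s ∈ d.keys, d.getD s [] ≠ []) →
      ∀ s ∈ (cs.foldl (fun d c => d.insert (key c) (d.getD (key c) [] ++ [c])) d).keys,
        (cs.foldl (fun d c => d.insert (key c) (d.getD (key c) [] ++ [c])) d).getD s [] ≠ [] by
    exact h PySem.Dict.empty (by simp [PySem.Dict.keys_empty])
  induction cs with
  | nil => intro d hd; exact hd
  | cons c cs ih =>
    intro d hd
    simp only [List.foldl_cons]
    refine ih _ ?_
    intro s hs
    rcases (PySem.Dict.mem_keys_insert _ _ _ _).mp hs with he | hm
    · subst he
      rw [PySem.Dict.getD_insert_self]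
      simp
    · rw [PySem.Dict.getD_insert]
      by_cases hsk : s = key c
      · subst hsk; simp
      · simp only [hsk, if_false]
        exact hd s hm

lemma pvSumBump (l : List String) (f g : String → Nat) (t : String)
    (hnd : l.Nodup) (ht : t ∈ l) (hfg : ∀ s ∈ l, s ≠ t → g s = f s)
    (hft : g t = f t + 1) : (l.map g).sum = (l.map f).sum + 1 := by
  induction l with
  | nil => simp at ht
  | cons a as ih =>
    simp only [List.nodup_cons] at hnd
    simp only [List.map_cons, List.sum_cons]
    rcases List.mem_cons.mp ht with he | hm
    · subst he
      rw [hft, List.map_congr_left (fun s hs => hfg s (by simp [hs]) (by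
        rintro rfl; exact hnd.1 hs))]
      omega
    · rw [hfg a (by simp) (by rintro rfl; exact hnd.1 hm),
        ih hnd.2 hm (fun s hs hst => hfg s (by simp [hs]) hst)]
      omega

lemma pvSumInsert (d : PySem.Dict String (List (List (String × String))))
    (t : String) (c : List (String × String)) (hnd : d.keys.Nodup) :
    ((d.insert t (d.getD t [] ++ [c])).keys.map
        (fun s => ((d.insert t (d.getD t [] ++ [c])).getD s []).length)).sum =
      (d.keys.map (fun s => (d.getD s []).length)).sum + 1 := by
  by_cases hc : d.contains t = true
  · rw [PySem.Dict.keys_insert_of_contains _ _ hc]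
    refine pvSumBump d.keys _ _ t hnd ((PySem.Dict.contains_iff_mem_keys _ _).mp hc) ?_ ?_
    · intro s _ hst
      rw [PySem.Dict.getD_insert]
      simp [hst]
    · rw [PySem.Dict.getD_insert_self]
      simp
  · have hc' : d.contains t = false := by simpa using hc
    rw [PySem.Dict.keys_insert_of_not_contains _ _ hc']
    rw [List.map_append, List.sum_append]
    have h1 : ∀ s ∈ d.keys, ((d.insert t (d.getD t [] ++ [c])).getD s []).length =
        (d.getD s []).length := by
      intro s hs
      have hst : s ≠ t := by
        rintro rfl
        have := (PySem.Dict.contains_iff_mem_keys _ _).mpr hs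
        rw [hc'] at this
        exact Bool.false_ne_true this
      rw [PySem.Dict.getD_insert]
      simp [hst]
    rw [List.map_congr_left h1]
    have h2 : d.getD t [] = [] := PySem.Dict.getD_of_not_contains _ _ hc'
    simp [PySem.Dict.getD_insert_self, h2]

lemma pvBucketBy_sum (key : List (String × String) → String)
    (cs : List (List (String × String))) :
    ((pvBucketBy key cs).keys.map (fun s => ((pvBucketBy key cs).getD s []).length)).sum
      = cs.length := by
  suffices h : ∀ (d : PySem.Dict String (List (List (String × String)))),
      d.keys.Nodup →
      ((cs.foldl (fun d c => d.insert (key c) (d.getD (key c) [] ++ [c])) d).keys.map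
          (fun s => ((cs.foldl (fun d c => d.insert (key c) (d.getD (key c) [] ++ [c])) d).getD s []).length)).sum
        = (d.keys.map (fun s => (d.getD s []).length)).sum + cs.length by
    have := h PySem.Dict.empty (by simp [PySem.Dict.keys_empty])
    simpa [PySem.Dict.keys_empty] using this
  induction cs with
  | nil => intro d _; simp
  | cons c cs ih =>
    intro d hnd
    simp only [List.foldl_cons, List.length_cons]
    rw [ih _ (PySem.Dict.nodup_keys_insert _ _ _ hnd), pvSumInsert d (key c) c hnd]
    omega

lemma pvColInt (rows : List (List (List (String × String)))) (i : Nat) :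
    rows.filterMap (fun row =>
        if ((0:Int) + (i:Int)) < (row.length : Int) then PySem.List.pyGet? row ((0:Int) + (i:Int))
        else none) =
      rows.filterMap (fun r => r[i]?) := by
  refine List.filterMap_congr (fun row _ => ?_)
  by_cases h : i < row.length
  · rw [if_pos (by omega)]
    simp [PySem.List.pyGet?_natCast]
  · rw [if_neg (by omega)]
    rw [List.getElem?_eq_none (by omega)]

lemma pvPerType (k : Int) (hk : ¬ k ≤ 0) (group : List (List (String × String))) :
    pvRRLoop k (group.length + 2) (pvBucketBy pvSubtype group)
        (PySem.List.sorted (pvBucketBy pvSubtype group).keys (fun s => s.toList)) [] =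
      PySem.List.slice
        ((PySem.List.pyRange 0
            (PySem.List.maxD
              ((((PySem.List.sorted (pvBucketBy pvSubtype group).keys (fun s => s.toList)).map
                  (fun s => (pvBucketBy pvSubtype group).getD s [])).map PySem.List.len))
              (fun x => x) 0) 1).flatMap
          (fun i =>
            ((PySem.List.sorted (pvBucketBy pvSubtype group).keys (fun s => s.toList)).map
                (fun s => (pvBucketBy pvSubtype group).getD s [])).filterMap
              (fun row => if i < (row.length : Int) then PySem.List.pyGet? row i else none)))
        none (some k) := by
  set sb := pvBucketBy pvSubtype group with hsb
  set order := PySem.List.sorted sb.keys (fun s => s.toList) with horder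
  set rows := order.map (fun s => sb.getD s []) with hrows
  set width := PySem.List.maxD (rows.map PySem.List.len) (fun x => x) 0 with hwidth
  have hperm : order.Perm sb.keys := PySem.List.sorted_perm _ _ _
  have hndk : sb.keys.Nodup := pvBucketBy_nodup pvSubtype group
  have hnd : order.Nodup := hperm.nodup_iff.mpr hndk
  have hne : ∀ s ∈ order, sb.getD s [] ≠ [] :=
    fun s hs => pvBucketBy_ne pvSubtype group s (hperm.mem_iff.mp hs)
  have hlen : ∀ s ∈ order, (sb.getD s []).length ≤ width.toNat := by
    intro s hs
    have hmem : PySem.List.len (sb.getD s []) ∈ rows.map PySem.List.len := by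
      rw [hrows, List.map_map]
      exact List.mem_map.mpr ⟨s, hs, rfl⟩
    have := PySem.List.le_maxD_id _ 0 _ hmem
    rw [PySem.List.len_eq] at this
    omega
  have hfuel : pvTotal sb order + 1 ≤ group.length + 2 := by
    have hsum : pvTotal sb order = group.length := by
      unfold pvTotal
      rw [(hperm.map (fun s => (sb.getD s []).length)).sum_eq]
      exact pvBucketBy_sum pvSubtype group
    omega
  have hflat : ((PySem.List.pyRange 0 width 1).flatMap
      (fun i => rows.filterMap
        (fun row => if i < (row.length : Int) then PySem.List.pyGet? row i else none))) =
      pvCols width.toNat rows := by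
    rw [PySem.List.pyRange_one, List.flatMap_map]
    unfold pvCols
    rw [show (width - 0).toNat = width.toNat by omega]
    congr 1
    funext i
    exact pvColInt rows i
  rw [hflat, PySem.List.slice_to _ (by omega : (0:Int) ≤ k)]
  rw [pvMain k (group.length + 2) sb order [] width.toNat hnd hne hlen hfuel]
  simp [← hrows]

-- ===== VERDICT (by name: the statement is the Claim_ definition above) =====
theorem sample_cases_py_spec : Claim_equal_sample_cases_py := by
  unfold Claim_equal_sample_cases_py
  intro cases spt _
  unfold Spec_sample_cases_py
  cases spt with
  | none => rfl
  | some k =>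
    by_cases hk : k ≤ 0
    · simp [sample_cases_py, sample_cases_py_alt, hk]
    · simp only [sample_cases_py, sample_cases_py_alt, if_neg hk]
      congr 1
      funext sampled qt
      rw [pvPerType k hk (pvBucketBy pvQType cases |>.getD qt [])]
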